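-- pv_equiv track=rewrite | github.com/sofakob/rabbit | laba.py | sdvic
-- ===== SOURCE A (Python) =====
-- def sdvic(arr, i):
--     arr=bin((arr))[2:]
--     arr= arr.zfill(32)
--     arr=[int(x) for x in arr]
--     for j in range(i):
--         x=arr.pop(0)
--         arr.append(x)
--
--     arr=''.join(str(x) for x in arr)
--     arr=(int(arr, 2))
--     return arr
-- ===== SOURCE B (Python) =====
-- def sdvic(arr, i):
--     n = max(32, arr.bit_length())
--     s = i % n if i > 0 else 0
--     q, r = divmod(arr, 1 << (n - s))
--     return r * (1 << s) + q
-- ===== Notes on version B (the rewrite author's own statement) =====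
-- stated objective: faster
-- what changed: Replaces the digit-list build and the one-bit-per-iteration pop/append rotation loop (i iterations) with a single closed-form divmod: split arr at bit n-s and recombine as r*2^s+q.
import Mathlib
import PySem

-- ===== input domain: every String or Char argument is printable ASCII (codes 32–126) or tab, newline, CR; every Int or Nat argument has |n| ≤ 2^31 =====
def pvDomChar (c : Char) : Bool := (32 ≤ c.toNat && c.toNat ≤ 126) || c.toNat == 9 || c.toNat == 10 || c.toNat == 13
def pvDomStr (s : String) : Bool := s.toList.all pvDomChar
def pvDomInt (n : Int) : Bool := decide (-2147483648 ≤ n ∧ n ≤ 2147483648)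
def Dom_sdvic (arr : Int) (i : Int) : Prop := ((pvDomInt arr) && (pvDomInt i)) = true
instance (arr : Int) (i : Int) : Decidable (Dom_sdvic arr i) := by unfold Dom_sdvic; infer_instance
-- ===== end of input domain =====

-- B replaces A's pop/append one-bit-at-a-time rotation loop with one closed-form divmod (faster).
-- A raises ValueError on arr < 0 (bin()[2:] parse); those inputs are outside Pre_.

-- ===== PORT A =====
-- bin(n)[2:] for n > 0, ported by hand over digit lists (exact: MSB-first binary digits)
def pvBin (n : Nat) : List Nat :=
  if h : n = 0 then [] else pvBin (n / 2) ++ [n % 2]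
decreasing_by exact Nat.div_lt_self (Nat.pos_of_ne_zero h) (by norm_num)

-- for j in range(i): x = arr.pop(0); arr.append(x)
def pvRot : List Nat → Nat → List Nat
  | l, 0 => l
  | l, k+1 => pvRot (l.drop 1 ++ l.take 1) k

def sdvic (arr : Int) (i : Int) : Int :=
  let ds := if arr.toNat = 0 then [0] else pvBin arr.toNat      -- bin(arr)[2:]  (arr ≥ 0 on Pre_)
  let ds := List.replicate (32 - ds.length) 0 ++ ds             -- arr.zfill(32), then [int(x) for x in arr]
  let ds := pvRot ds i.toNat                                    -- the rotation loop (empty when i ≤ 0)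
  Int.ofNat (ds.foldl (fun a d => 2*a + d) 0)                   -- int(''.join(str(x) …), 2)

-- ===== PORT B =====
-- arr.bit_length()  (of the absolute value, as in Python)
def pvBitLength (a : Int) : Nat :=
  if a.natAbs = 0 then 0 else Nat.log2 a.natAbs + 1

def sdvic_alt (arr : Int) (i : Int) : Int :=
  let n : Int := max 32 (Int.ofNat (pvBitLength arr))
  let s : Int := if 0 < i then PySem.Int.mod i n else 0
  let q := PySem.Int.floordiv arr (2 ^ (n - s).toNat)           -- q, r = divmod(arr, 1 << (n - s))
  let r := PySem.Int.mod arr (2 ^ (n - s).toNat)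
  r * 2 ^ s.toNat + q                                           -- r * (1 << s) + q

-- ===== PRECONDITION & SPEC =====
-- Pre_ excludes arr < 0, exactly the inputs on which A raises ValueError (bin(arr)[2:] keeps the 'b').
def Pre_sdvic (arr : Int) (i : Int) : Prop := 0 ≤ arr
instance (arr : Int) (i : Int) : Decidable (Pre_sdvic arr i) := by unfold Pre_sdvic; infer_instance
def pvWitness_sdvic : Int × Int := (5, 3)

def Spec_sdvic (arr : Int) (i : Int) (out : Int) : Prop := out = sdvic_alt arr i
instance (arr : Int) (i : Int) (out : Int) : Decidable (Spec_sdvic arr i out) := by unfold Spec_sdvic; infer_instance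

-- ===== CLAIM (what is proved, stated in full; the proofs are below) =====
def Claim_equal_sdvic : Prop := ∀ (arr : Int) (i : Int), Dom_sdvic arr i → Pre_sdvic arr i → Spec_sdvic arr i (sdvic arr i)

-- ===== LEMMAS AND PROOFS =====

def pvVal (l : List Nat) : Nat := l.foldl (fun a d => 2*a + d) 0

theorem pvVal_from (l : List Nat) (acc : Nat) :
    l.foldl (fun a d => 2*a + d) acc = acc * 2 ^ l.length + pvVal l := by
  induction l generalizing acc with
  | nil => simp [pvVal]
  | cons d l ih =>
    simp only [List.foldl_cons, List.length_cons, pvVal]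
    rw [ih (2 * acc + d), ih (2 * 0 + d)]
    ring

theorem pvVal_cons (d : Nat) (l : List Nat) :
    pvVal (d :: l) = d * 2 ^ l.length + pvVal l := by
  simp only [pvVal, List.foldl_cons]
  simpa using pvVal_from l d

theorem pvVal_append (l1 l2 : List Nat) :
    pvVal (l1 ++ l2) = pvVal l1 * 2 ^ l2.length + pvVal l2 := by
  simp only [pvVal, List.foldl_append]
  simpa using pvVal_from l2 (pvVal l1)

theorem pvVal_lt (l : List Nat) (h : ∀ x ∈ l, x ≤ 1) : pvVal l < 2 ^ l.length := by
  induction l with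
  | nil => simp [pvVal]
  | cons d l ih =>
    have hd : d ≤ 1 := h d (by simp)
    have hl := ih (fun x hx => h x (by simp [hx]))
    rw [pvVal_cons]
    simp only [List.length_cons, pow_succ]
    nlinarith

theorem pvBin_val (n : Nat) : pvVal (pvBin n) = n := by
  induction n using Nat.strong_induction_on with
  | _ n ih =>
    rw [pvBin]
    split
    · simp [pvVal, *]
    · rename_i h
      rw [pvVal_append, ih (n / 2) (Nat.div_lt_self (Nat.pos_of_ne_zero h) (by norm_num))]
      simp [pvVal]
      omega

theorem pvBin_bits (n : Nat) : ∀ x ∈ pvBin n, x ≤ 1 := by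
  induction n using Nat.strong_induction_on with
  | _ n ih =>
    rw [pvBin]
    split
    · simp
    · rename_i h
      intro x hx
      rcases List.mem_append.1 hx with hx | hx
      · exact ih (n / 2) (Nat.div_lt_self (Nat.pos_of_ne_zero h) (by norm_num)) x hx
      · simp at hx; omega

theorem pvBin_len (n m : Nat) (h : n < 2 ^ m) : (pvBin n).length ≤ m := by
  induction n using Nat.strong_induction_on generalizing m with
  | _ n ih =>
    rw [pvBin]
    split
    · simp
    · rename_i hn
      have hm : 1 ≤ m := by
        by_contra hc
        interval_cases m <;> omega
      have : n / 2 < 2 ^ (m - 1) := by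
        have : 2 ^ m = 2 ^ (m - 1) * 2 := by
          rw [← pow_succ]; congr 1; omega
        omega
      have := ih (n / 2) (Nat.div_lt_self (Nat.pos_of_ne_zero hn) (by norm_num)) (m - 1) this
      simp only [List.length_append, List.length_cons, List.length_nil]
      omega

theorem pvRot_eq_rotate' (l : List Nat) (k : Nat) : pvRot l k = l.rotate' k := by
  induction k generalizing l with
  | zero => cases l <;> simp [pvRot, List.rotate']
  | succ k ih =>
    cases l with
    | nil =>
      show pvRot ([] ++ []) k = _
      simp only [List.nil_append]
      rw [ih]
      simp [List.rotate']
    | cons a l =>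
      show pvRot (l ++ [a]) k = _
      rw [ih, List.rotate'_cons_succ]

theorem pvVal_replicate (k : Nat) : pvVal (List.replicate k 0) = 0 := by
  induction k with
  | zero => rfl
  | succ k ih => rw [List.replicate_succ, pvVal_cons, ih]; simp

theorem rot_val (L : List Nat) (hb : ∀ x ∈ L, x ≤ 1) (s : Nat) (hs : s ≤ L.length) :
    pvVal (L.drop s ++ L.take s)
      = pvVal L % 2 ^ (L.length - s) * 2 ^ s + pvVal L / 2 ^ (L.length - s) := by
  have hT : (L.take s).length = s := by simp [hs]
  have hD : (L.drop s).length = L.length - s := by simp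
  have hsplit : pvVal L = pvVal (L.take s) * 2 ^ (L.length - s) + pvVal (L.drop s) := by
    conv_lhs => rw [← List.take_append_drop s L]
    rw [pvVal_append, hD]
  have hlt : pvVal (L.drop s) < 2 ^ (L.length - s) := by
    rw [← hD]; exact pvVal_lt _ (fun x hx => hb x (List.mem_of_mem_drop hx))
  have hdiv : pvVal L / 2 ^ (L.length - s) = pvVal (L.take s) := by
    rw [hsplit, mul_comm, Nat.mul_add_div (by positivity), Nat.div_eq_of_lt hlt, Nat.add_zero]
  have hmod : pvVal L % 2 ^ (L.length - s) = pvVal (L.drop s) := by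
    rw [hsplit, mul_comm, Nat.mul_add_mod, Nat.mod_eq_of_lt hlt]
  rw [pvVal_append, hT, hdiv, hmod]

-- ===== VERDICT (by name: the statement is the Claim_ definition above) =====
theorem sdvic_spec : Claim_equal_sdvic := by
  intro arr i hdom hpre
  unfold Spec_sdvic
  show sdvic arr i = sdvic_alt arr i
  simp only [sdvic, sdvic_alt]
  have hdom' : arr ≤ 2147483648 ∧ -2147483648 ≤ i ∧ i ≤ 2147483648 := by
    unfold Dom_sdvic pvDomInt at hdom; simp at hdom; omega
  have hpre' : 0 ≤ arr := hpre
  set a := arr.toNat with ha'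
  have ha : arr = ((a : Nat) : Int) := (Int.toNat_of_nonneg hpre').symm
  have ha32 : a < 2 ^ 32 := by
    have : a ≤ 2147483648 := by omega
    omega
  -- width is 32 on the whole domain
  have hbl : pvBitLength arr ≤ 32 := by
    unfold pvBitLength
    have hna : arr.natAbs = a := by omega
    rw [hna]
    split
    · omega
    · rename_i h
      have := (Nat.log2_lt h).2 (by omega : a < 2 ^ 32)
      omega
  have hn : max (32 : Int) (Int.ofNat (pvBitLength arr)) = 32 := by
    rw [max_eq_left]
    simp only [Int.ofNat_eq_natCast]
    exact_mod_cast hbl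
  rw [hn]
  -- the padded digit list
  set ds : List Nat := (if a = 0 then [0] else pvBin a) with hds
  have dsv : pvVal ds = a := by
    rw [hds]; split
    · simp [pvVal]; omega
    · exact pvBin_val a
  have dsb : ∀ x ∈ ds, x ≤ 1 := by
    rw [hds]; split
    · simp
    · exact pvBin_bits a
  have dsl : ds.length ≤ 32 := by
    rw [hds]; split
    · simp
    · exact pvBin_len a 32 ha32
  set L : List Nat := List.replicate (32 - ds.length) 0 ++ ds with hL
  have Llen : L.length = 32 := by rw [hL]; simp; omega
  have Lval : pvVal L = a := by rw [hL, pvVal_append, pvVal_replicate, dsv]; ring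
  have Lb : ∀ x ∈ L, x ≤ 1 := by
    rw [hL]; intro x hx
    rcases List.mem_append.1 hx with hx | hx
    · simp [List.eq_of_mem_replicate hx]
    · exact dsb x hx
  have hfold : ∀ l : List Nat, List.foldl (fun acc d => 2*acc + d) 0 l = pvVal l :=
    fun _ => rfl
  by_cases hi : 0 < i
  · -- positive rotation count
    have him : i = ((i.toNat : Nat) : Int) := (Int.toNat_of_nonneg hi.le).symm
    have hmods : PySem.Int.mod i 32 = ((i.toNat % 32 : Nat) : Int) := by
      rw [PySem.Int.mod_eq_emod_of_pos (by norm_num)]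
      conv_lhs => rw [him]
      norm_cast
    rw [if_pos hi, hmods]
    set m := i.toNat with hm
    set sn := m % 32 with hsn
    have hsnlt : sn < 32 := Nat.mod_lt _ (by norm_num)
    have hrot : pvRot L m = L.drop sn ++ L.take sn := by
      rw [pvRot_eq_rotate', ← List.rotate_eq_rotate', ← List.rotate_mod, Llen, ← hsn,
        List.rotate_eq_drop_append_take (by omega)]
    rw [hrot, hfold, rot_val L Lb sn (by omega), Llen, Lval]
    have hts : ((32 : Int) - ((sn : Nat) : Int)).toNat = 32 - sn := by omega
    have hts2 : (((sn : Nat) : Int)).toNat = sn := by omega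
    rw [hts, hts2]
    conv_rhs => rw [ha]
    rw [(by push_cast; ring : ((2 : Int) ^ (32 - sn)) = ((2 ^ (32 - sn) : Nat) : Int)),
      PySem.Int.floordiv_natCast, PySem.Int.mod_natCast]
    simp only [Int.ofNat_eq_natCast]
    push_cast
    ring
  · -- i ≤ 0 : the loop body never runs
    have him : i.toNat = 0 := by omega
    rw [if_neg hi, him]
    have h0 : pvRot L 0 = L := rfl
    rw [h0, hfold, Lval]
    rw [sub_zero, (by omega : ((32 : Int)).toNat = 32), (by omega : ((0 : Int)).toNat = 0)]
    conv_rhs => rw [ha]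
    rw [(by push_cast : ((2 : Int) ^ 32) = ((2 ^ 32 : Nat) : Int)),
      PySem.Int.floordiv_natCast, PySem.Int.mod_natCast]
    rw [Nat.div_eq_of_lt ha32, Nat.mod_eq_of_lt ha32]
    simp only [Int.ofNat_eq_natCast]
    push_cast
    ring
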